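-- pv_equiv track=rewrite | github.com/Massy100/AlgebraLineal | Codificador/codificador.py | texto_a_matriz
-- ===== SOURCE A (Python) =====
-- def texto_a_matriz(texto):
--     # Dividir el texto en números, asumiendo que está separado por espacios
--     numeros = list(map(int, texto.split()))
--
--     # Asumiendo que siempre debemos tener 3 filas
--     num_filas = 3
--     # Calcula el número de columnas necesarias
--     num_columnas = -(-len(numeros) // num_filas)  # Cielo de la división
--
--     # Crear la matriz con 3 filas inicialmente vacías
--     matriz = [[0 for _ in range(num_columnas)] for _ in range(num_filas)]
--
--     # Llenar la matriz con los números codificados, ajustando en columnas de izquierda a derecha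
--     idx = 0
--     for num in numeros:
--         fila = idx % num_filas  # Determina la fila actual basada en el índice
--         columna = idx // num_filas  # Determina la columna actual basada en el índice
--         matriz[fila][columna] = num
--         idx += 1
--
--     return matriz
-- ===== SOURCE B (Python) =====
-- def texto_a_matriz(texto):
--     # Re-implementation: consume the numbers three at a time, each group being one
--     # zero-padded column, and build the three rows front-to-back by recursion.
--     numeros = list(map(int, texto.split()))
--
--     def filas(ns):
--         if not ns:
--             return ([], [], [])
--         trio = (ns + [0, 0])[:3]
--         a, b, c = filas(ns[3:])
--         return ([trio[0]] + a, [trio[1]] + b, [trio[2]] + c)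
--
--     f0, f1, f2 = filas(numeros)
--     return [f0, f1, f2]
-- ===== Notes on version B (the rewrite author's own statement) =====
-- stated objective: alternative
-- what changed: Replaces the index-scatter loop into a preallocated zero matrix (idx%3 / idx//3 writes) with a recursion that consumes the numbers three at a time, each group a zero-padded column, consing the three rows front-to-back.
import Mathlib
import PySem

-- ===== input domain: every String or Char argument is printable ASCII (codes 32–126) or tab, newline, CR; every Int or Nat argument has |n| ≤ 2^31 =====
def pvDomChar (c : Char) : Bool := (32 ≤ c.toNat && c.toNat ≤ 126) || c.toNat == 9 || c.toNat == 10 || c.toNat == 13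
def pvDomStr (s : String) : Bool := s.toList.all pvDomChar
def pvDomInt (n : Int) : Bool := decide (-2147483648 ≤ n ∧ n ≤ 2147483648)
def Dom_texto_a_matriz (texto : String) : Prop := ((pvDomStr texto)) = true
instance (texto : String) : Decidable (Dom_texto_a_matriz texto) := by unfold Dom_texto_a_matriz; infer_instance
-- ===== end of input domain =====

-- B builds the three rows by consuming the numbers three at a time (one zero-padded
-- column per recursive step) instead of A's index-scatter into a preallocated zero matrix.

-- ===== PORT A =====
-- the 'for num in numeros' loop with its idx counter, writing matriz[idx%3][idx//3] = num
def fillA : List (List Int) → Int → List Int → List (List Int)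
  | m, _, [] => m
  | m, idx, num :: rest =>
      fillA (m.modify (PySem.Int.mod idx 3).toNat
               (fun r => r.set (PySem.Int.floordiv idx 3).toNat num)) (idx + 1) rest

def texto_a_matriz (texto : String) : List (List Int) :=
  let numeros := (PySem.Str.split₀ texto).map (fun t => (PySem.Int.ofStr? t).getD 0)
  let num_filas : Int := 3
  let num_columnas : Int := -(PySem.Int.floordiv (-(PySem.List.len numeros)) num_filas)
  let matriz := (PySem.List.pyRange 0 num_filas 1).map
      (fun _ => (PySem.List.pyRange 0 num_columnas 1).map (fun _ => (0 : Int)))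
  fillA matriz 0 numeros

-- ===== PORT B =====
-- the recursive helper 'filas': cases [], [x], [x,y] are '(ns + [0,0])[:3]' on a short list
def filasB : List Int → List Int × List Int × List Int
  | [] => ([], [], [])
  | [x] => ([x], [0], [0])
  | [x, y] => ([x], [y], [0])
  | x :: y :: z :: t =>
      let p := filasB t
      (x :: p.1, y :: p.2.1, z :: p.2.2)

def texto_a_matriz_alt (texto : String) : List (List Int) :=
  let numeros := (PySem.Str.split₀ texto).map (fun t => (PySem.Int.ofStr? t).getD 0)
  let p := filasB numeros
  [p.1, p.2.1, p.2.2]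

-- ===== PRECONDITION & SPEC =====
-- Pre_ excludes exactly the texts containing a whitespace-separated token that int() rejects,
-- on which Python A raises ValueError.
def Pre_texto_a_matriz (texto : String) : Prop :=
  (PySem.Str.split₀ texto).all (fun t => (PySem.Int.ofStr? t).isSome) = true
instance (texto : String) : Decidable (Pre_texto_a_matriz texto) := by
  unfold Pre_texto_a_matriz; infer_instance
def pvWitness_texto_a_matriz : String := "1 2 3 4"

def Spec_texto_a_matriz (texto : String) (out : List (List Int)) : Prop := out = texto_a_matriz_alt texto
instance (texto : String) (out : List (List Int)) : Decidable (Spec_texto_a_matriz texto out) := by unfold Spec_texto_a_matriz; infer_instance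

-- ===== CLAIM (what is proved, stated in full; the proofs are below) =====
def Claim_equal_texto_a_matriz : Prop := ∀ (texto : String), Dom_texto_a_matriz texto → Pre_texto_a_matriz texto → Spec_texto_a_matriz texto (texto_a_matriz texto)

-- ===== LEMMAS AND PROOFS =====

-- triple view of A's loop state: the three rows of the 3-row matrix
def fill3 : List Int × List Int × List Int → Int → List Int → List Int × List Int × List Int
  | p, _, [] => p
  | (a, b, c), idx, num :: rest =>
      let col := (PySem.Int.floordiv idx 3).toNat
      if PySem.Int.mod idx 3 = 0 then fill3 (a.set col num, b, c) (idx + 1) rest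
      else if PySem.Int.mod idx 3 = 1 then fill3 (a, b.set col num, c) (idx + 1) rest
      else fill3 (a, b, c.set col num) (idx + 1) rest

lemma fillA_eq_fill3 (ns : List Int) : ∀ (a b c : List Int) (idx : Int), 0 ≤ idx →
    fillA [a, b, c] idx ns =
      [(fill3 (a, b, c) idx ns).1, (fill3 (a, b, c) idx ns).2.1, (fill3 (a, b, c) idx ns).2.2] := by
  induction ns with
  | nil => intro a b c idx _; simp [fillA, fill3]
  | cons x r ih =>
      intro a b c idx hidx
      have h3 : (0 : Int) < 3 := by norm_num
      have hm : PySem.Int.mod idx 3 = idx % 3 := PySem.Int.mod_eq_emod_of_pos h3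
      have hcases : idx % 3 = 0 ∨ idx % 3 = 1 ∨ idx % 3 = 2 := by omega
      rcases hcases with h | h | h
      · simp only [fillA, fill3, hm, h]
        norm_num
        exact ih _ _ _ _ (by omega)
      · simp only [fillA, fill3, hm, h]
        norm_num [List.modify]
        exact ih _ _ _ _ (by omega)
      · simp only [fillA, fill3, hm, h]
        norm_num [List.modify]
        exact ih _ _ _ _ (by omega)

lemma fill3_shift (ns : List Int) :
    ∀ (k : Int) (h0 h1 h2 : Int) (t0 t1 t2 : List Int), 0 ≤ k →
    fill3 (h0 :: t0, h1 :: t1, h2 :: t2) (k + 3) ns =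
      (h0 :: (fill3 (t0, t1, t2) k ns).1,
       h1 :: (fill3 (t0, t1, t2) k ns).2.1,
       h2 :: (fill3 (t0, t1, t2) k ns).2.2) := by
  induction ns with
  | nil => intro k h0 h1 h2 t0 t1 t2 _; simp [fill3]
  | cons x r ih =>
      intro k h0 h1 h2 t0 t1 t2 hk
      have h3 : (0 : Int) < 3 := by norm_num
      have hm1 : PySem.Int.mod (k + 3) 3 = k % 3 := by
        rw [PySem.Int.mod_eq_emod_of_pos h3]; omega
      have hm2 : PySem.Int.mod k 3 = k % 3 := PySem.Int.mod_eq_emod_of_pos h3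
      have hd1 : PySem.Int.floordiv (k + 3) 3 = k / 3 + 1 := by
        rw [PySem.Int.floordiv_eq_ediv_of_pos h3]; omega
      have hd2 : PySem.Int.floordiv k 3 = k / 3 := PySem.Int.floordiv_eq_ediv_of_pos h3
      have hdnn : 0 ≤ k / 3 := by positivity
      have htn : (k / 3 + 1).toNat = (k / 3).toNat + 1 := by omega
      have hcases : k % 3 = 0 ∨ k % 3 = 1 ∨ k % 3 = 2 := by omega
      rcases hcases with h | h | h <;>
        · simp only [fill3, hm1, hm2, hd1, hd2, h, htn, List.set_cons_succ]
          norm_num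
          rw [show k + 3 + 1 = (k + 1) + 3 from by ring]
          exact ih (k + 1) _ _ _ _ _ _ (by omega)

lemma mod03 : PySem.Int.mod 0 3 = 0 := by decide
lemma div03 : PySem.Int.floordiv 0 3 = 0 := by decide

lemma fill3_init (ns : List Int) :
    fill3 (List.replicate ((ns.length + 2) / 3) 0,
           List.replicate ((ns.length + 2) / 3) 0,
           List.replicate ((ns.length + 2) / 3) 0) 0 ns = filasB ns := by
  induction ns using filasB.induct with
  | case1 => simp [fill3, filasB]
  | case2 x => simp [fill3, filasB]
  | case3 x y => simp [fill3, filasB]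
  | case4 x y z t ih =>
      have hlen : ((x :: y :: z :: t).length + 2) / 3 = (t.length + 2) / 3 + 1 := by
        simp only [List.length_cons]; omega
      rw [hlen, List.replicate_succ]
      simp only [fill3, mod03, div03, Int.toNat_zero]
      norm_num
      rw [show (3 : Int) = 0 + 3 from by norm_num, fill3_shift t 0 x y z _ _ _ le_rfl, ih]
      simp [filasB]

lemma ceil3 (n : Nat) :
    -(PySem.Int.floordiv (-(n : Int)) 3) = (((n + 2) / 3 : Nat) : Int) := by
  rw [PySem.Int.neg_floordiv_neg_eq_iff_of_pos (show (0:Int) < 3 by norm_num)]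
  constructor <;> omega

lemma zero_row (C : Int) :
    (PySem.List.pyRange 0 C 1).map (fun _ => (0 : Int)) = List.replicate C.toNat 0 := by
  rw [PySem.List.pyRange_one, List.map_map]
  simp [Function.comp_def, List.map_const']

-- ===== VERDICT (by name: the statement is the Claim_ definition above) =====
theorem texto_a_matriz_spec : Claim_equal_texto_a_matriz := by
  intro texto _ _
  unfold Spec_texto_a_matriz texto_a_matriz texto_a_matriz_alt
  set ns := (PySem.Str.split₀ texto).map (fun t => (PySem.Int.ofStr? t).getD 0) with hns
  simp only [PySem.List.len_eq]
  rw [show (PySem.List.pyRange 0 3 1) = [0, 1, 2] from by decide]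
  simp only [List.map]
  rw [ceil3 ns.length, zero_row, Int.toNat_natCast]
  rw [fillA_eq_fill3 ns _ _ _ 0 le_rfl, fill3_init ns]
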